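-- pv_equiv track=rewrite | github.com/VLolov/Norgate | Src/Futures/Database/CreateDatabase.py | symbol_to_sector
-- ===== SOURCE A (Python) =====
-- def symbol_to_sector(symbol):
--     sectors = {
--         'Crypto': ['BTC', 'ETH', 'MBT', 'MET'],
--         'Currency': ['6A', '6B', '6C', '6E', '6J', '6M', '6N', '6S', 'DX'],
--         'Energy': ['BRN', 'CL', 'GAS', 'GWM', 'HO', 'NG', 'RB', 'WBS'],
--         'Volatility': ['VX'],
--
--         'Equity': [
--             'EMD', 'ES', 'FCE', 'CAC 40', 'FDAX', 'FESX', 'FSMI', 'FTDX',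
--             'HSI', 'HTW', 'KOS', 'LFT', 'M2K', 'MES', 'MHI', 'MNQ',
--             'MYM', 'NIY', 'NKD', 'NQ', 'RTY', 'SCN', 'SNK', 'SSG',
--             'SXF', 'YAP', 'YM',
--             'VX',
--             'GD'  # note: this is S&P GSCI - commodity index futures quotes
--         ],
--         'Metal': ['GC', 'HG', 'PA', 'PL', 'SI'],
--         'Fixed Income': [
--             'CGB', 'FBTP', 'FGBL', 'FGBM', 'FGBS', 'FGBX',
--             'FOAT', 'LLG', 'LSS', 'SJB', 'TN', 'UB', 'YIB',
--             'YIR', 'YXT', 'YYT',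
--             'ZB', 'ZF', 'ZN', 'ZQ', 'ZT'
--         ],
--         'Rates': ['BAX', 'CRA', 'LES', 'LEU', 'SO3', 'SR3'],
--         'Grain': ['AWM', 'AFB', 'KE', 'LWB', 'MWE', 'ZC', 'ZL', 'ZM', 'ZO', 'ZR', 'ZS', 'ZW'],
--         'Soft': ['CC', 'CT', 'DC', 'KC', 'LBR', 'LCC', 'LRC', 'LSU', 'OJ', 'RS', 'SB'],
--         'Meat': ['GF', 'HE', 'LE'],
--     }
--
--     for i, (sector, symbols) in enumerate(sectors.items()):
--         if symbol in symbols: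
--             return sector
--
--     msg = f"No sector found for symbol: {symbol}"
--     raise ValueError(msg)
-- ===== SOURCE B (Python) =====
-- _SECTOR_BY_SYMBOL = {
--     'BTC': 'Crypto',
--     'ETH': 'Crypto',
--     'MBT': 'Crypto',
--     'MET': 'Crypto',
--     '6A': 'Currency',
--     '6B': 'Currency',
--     '6C': 'Currency',
--     '6E': 'Currency',
--     '6J': 'Currency',
--     '6M': 'Currency',
--     '6N': 'Currency',
--     '6S': 'Currency',
--     'DX': 'Currency',
--     'BRN': 'Energy',
--     'CL': 'Energy',
--     'GAS': 'Energy',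
--     'GWM': 'Energy',
--     'HO': 'Energy',
--     'NG': 'Energy',
--     'RB': 'Energy',
--     'WBS': 'Energy',
--     'VX': 'Volatility',
--     'EMD': 'Equity',
--     'ES': 'Equity',
--     'FCE': 'Equity',
--     'CAC 40': 'Equity',
--     'FDAX': 'Equity',
--     'FESX': 'Equity',
--     'FSMI': 'Equity',
--     'FTDX': 'Equity',
--     'HSI': 'Equity',
--     'HTW': 'Equity',
--     'KOS': 'Equity',
--     'LFT': 'Equity',
--     'M2K': 'Equity',
--     'MES': 'Equity',
--     'MHI': 'Equity',
--     'MNQ': 'Equity',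
--     'MYM': 'Equity',
--     'NIY': 'Equity',
--     'NKD': 'Equity',
--     'NQ': 'Equity',
--     'RTY': 'Equity',
--     'SCN': 'Equity',
--     'SNK': 'Equity',
--     'SSG': 'Equity',
--     'SXF': 'Equity',
--     'YAP': 'Equity',
--     'YM': 'Equity',
--     'GD': 'Equity',
--     'GC': 'Metal',
--     'HG': 'Metal',
--     'PA': 'Metal',
--     'PL': 'Metal',
--     'SI': 'Metal',
--     'CGB': 'Fixed Income',
--     'FBTP': 'Fixed Income',
--     'FGBL': 'Fixed Income',
--     'FGBM': 'Fixed Income',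
--     'FGBS': 'Fixed Income',
--     'FGBX': 'Fixed Income',
--     'FOAT': 'Fixed Income',
--     'LLG': 'Fixed Income',
--     'LSS': 'Fixed Income',
--     'SJB': 'Fixed Income',
--     'TN': 'Fixed Income',
--     'UB': 'Fixed Income',
--     'YIB': 'Fixed Income',
--     'YIR': 'Fixed Income',
--     'YXT': 'Fixed Income',
--     'YYT': 'Fixed Income',
--     'ZB': 'Fixed Income',
--     'ZF': 'Fixed Income',
--     'ZN': 'Fixed Income',
--     'ZQ': 'Fixed Income',
--     'ZT': 'Fixed Income',
--     'BAX': 'Rates',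
--     'CRA': 'Rates',
--     'LES': 'Rates',
--     'LEU': 'Rates',
--     'SO3': 'Rates',
--     'SR3': 'Rates',
--     'AWM': 'Grain',
--     'AFB': 'Grain',
--     'KE': 'Grain',
--     'LWB': 'Grain',
--     'MWE': 'Grain',
--     'ZC': 'Grain',
--     'ZL': 'Grain',
--     'ZM': 'Grain',
--     'ZO': 'Grain',
--     'ZR': 'Grain',
--     'ZS': 'Grain',
--     'ZW': 'Grain',
--     'CC': 'Soft',
--     'CT': 'Soft',
--     'DC': 'Soft',
--     'KC': 'Soft',
--     'LBR': 'Soft',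
--     'LCC': 'Soft',
--     'LRC': 'Soft',
--     'LSU': 'Soft',
--     'OJ': 'Soft',
--     'RS': 'Soft',
--     'SB': 'Soft',
--     'GF': 'Meat',
--     'HE': 'Meat',
--     'LE': 'Meat',
-- }
--
--
-- def symbol_to_sector(symbol):
--     try:
--         return _SECTOR_BY_SYMBOL[symbol]
--     except KeyError:
--         raise ValueError(f"No sector found for symbol: {symbol}") from None
-- ===== Notes on version B (the rewrite author's own statement) =====
-- stated objective: idiomatic
-- what changed: Replaces the per-call scan over sector->symbol-list pairs by a flat precomputed symbol->sector dict literal (duplicate 'VX' written as 'Volatility', matching A's first-match rule) looked up once per call.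
-- outside the precondition, e.g. on symbol_to_sector('XXX'): A raises ValueError, B raises ValueError
import Mathlib
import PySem

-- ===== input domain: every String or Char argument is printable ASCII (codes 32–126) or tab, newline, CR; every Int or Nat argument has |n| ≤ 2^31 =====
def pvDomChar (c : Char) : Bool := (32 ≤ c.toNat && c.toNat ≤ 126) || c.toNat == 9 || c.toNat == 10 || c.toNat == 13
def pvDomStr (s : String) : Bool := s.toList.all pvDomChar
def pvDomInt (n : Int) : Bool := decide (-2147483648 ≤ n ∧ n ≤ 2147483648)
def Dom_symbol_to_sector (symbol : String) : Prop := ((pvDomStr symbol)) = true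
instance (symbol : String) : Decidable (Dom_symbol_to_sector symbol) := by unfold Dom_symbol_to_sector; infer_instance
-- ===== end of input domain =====

-- B replaces A's per-call scan over sector→symbol-list pairs by a flat precomputed
-- symbol→sector literal dict looked up once (duplicate 'VX' resolved to 'Volatility'
-- as A's first-match scan does); objective: idiomatic. Unknown symbols raise
-- ValueError in both Pythons (excluded by Pre_).

-- ===== PORT A =====
-- A's dict literal of sector → symbol list
def pvSectors : List (String × List String) :=
  [ ("Crypto", ["BTC", "ETH", "MBT", "MET"]),
    ("Currency", ["6A", "6B", "6C", "6E", "6J", "6M", "6N", "6S", "DX"]),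
    ("Energy", ["BRN", "CL", "GAS", "GWM", "HO", "NG", "RB", "WBS"]),
    ("Volatility", ["VX"]),
    ("Equity",
      ["EMD", "ES", "FCE", "CAC 40", "FDAX", "FESX", "FSMI", "FTDX",
       "HSI", "HTW", "KOS", "LFT", "M2K", "MES", "MHI", "MNQ",
       "MYM", "NIY", "NKD", "NQ", "RTY", "SCN", "SNK", "SSG",
       "SXF", "YAP", "YM", "VX", "GD"]),
    ("Metal", ["GC", "HG", "PA", "PL", "SI"]),
    ("Fixed Income",
      ["CGB", "FBTP", "FGBL", "FGBM", "FGBS", "FGBX",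
       "FOAT", "LLG", "LSS", "SJB", "TN", "UB", "YIB",
       "YIR", "YXT", "YYT", "ZB", "ZF", "ZN", "ZQ", "ZT"]),
    ("Rates", ["BAX", "CRA", "LES", "LEU", "SO3", "SR3"]),
    ("Grain", ["AWM", "AFB", "KE", "LWB", "MWE", "ZC", "ZL", "ZM", "ZO", "ZR", "ZS", "ZW"]),
    ("Soft", ["CC", "CT", "DC", "KC", "LBR", "LCC", "LRC", "LSU", "OJ", "RS", "SB"]),
    ("Meat", ["GF", "HE", "LE"]) ]

-- A's loop: first sector whose list contains the symbol; "" stands for the ValueError (excluded by Pre_)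
def symbol_to_sector_scan (symbol : String) : List (String × List String) → String
  | [] => ""
  | (sector, symbols) :: rest =>
      if symbols.contains symbol then sector else symbol_to_sector_scan symbol rest

def symbol_to_sector (symbol : String) : String :=
  symbol_to_sector_scan symbol pvSectors

-- ===== PORT B =====
-- B's module-level flat dict literal symbol → sector (Source B's _SECTOR_BY_SYMBOL)
def pvSectorBySymbol : PySem.Dict String String :=
  PySem.Dict.mk
  [ ("BTC", "Crypto"),
    ("ETH", "Crypto"),
    ("MBT", "Crypto"),
    ("MET", "Crypto"),
    ("6A", "Currency"),
    ("6B", "Currency"),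
    ("6C", "Currency"),
    ("6E", "Currency"),
    ("6J", "Currency"),
    ("6M", "Currency"),
    ("6N", "Currency"),
    ("6S", "Currency"),
    ("DX", "Currency"),
    ("BRN", "Energy"),
    ("CL", "Energy"),
    ("GAS", "Energy"),
    ("GWM", "Energy"),
    ("HO", "Energy"),
    ("NG", "Energy"),
    ("RB", "Energy"),
    ("WBS", "Energy"),
    ("VX", "Volatility"),
    ("EMD", "Equity"),
    ("ES", "Equity"),
    ("FCE", "Equity"),
    ("CAC 40", "Equity"),
    ("FDAX", "Equity"),
    ("FESX", "Equity"),
    ("FSMI", "Equity"),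
    ("FTDX", "Equity"),
    ("HSI", "Equity"),
    ("HTW", "Equity"),
    ("KOS", "Equity"),
    ("LFT", "Equity"),
    ("M2K", "Equity"),
    ("MES", "Equity"),
    ("MHI", "Equity"),
    ("MNQ", "Equity"),
    ("MYM", "Equity"),
    ("NIY", "Equity"),
    ("NKD", "Equity"),
    ("NQ", "Equity"),
    ("RTY", "Equity"),
    ("SCN", "Equity"),
    ("SNK", "Equity"),
    ("SSG", "Equity"),
    ("SXF", "Equity"),
    ("YAP", "Equity"),
    ("YM", "Equity"),
    ("GD", "Equity"),
    ("GC", "Metal"),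
    ("HG", "Metal"),
    ("PA", "Metal"),
    ("PL", "Metal"),
    ("SI", "Metal"),
    ("CGB", "Fixed Income"),
    ("FBTP", "Fixed Income"),
    ("FGBL", "Fixed Income"),
    ("FGBM", "Fixed Income"),
    ("FGBS", "Fixed Income"),
    ("FGBX", "Fixed Income"),
    ("FOAT", "Fixed Income"),
    ("LLG", "Fixed Income"),
    ("LSS", "Fixed Income"),
    ("SJB", "Fixed Income"),
    ("TN", "Fixed Income"),
    ("UB", "Fixed Income"),
    ("YIB", "Fixed Income"),
    ("YIR", "Fixed Income"),
    ("YXT", "Fixed Income"),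
    ("YYT", "Fixed Income"),
    ("ZB", "Fixed Income"),
    ("ZF", "Fixed Income"),
    ("ZN", "Fixed Income"),
    ("ZQ", "Fixed Income"),
    ("ZT", "Fixed Income"),
    ("BAX", "Rates"),
    ("CRA", "Rates"),
    ("LES", "Rates"),
    ("LEU", "Rates"),
    ("SO3", "Rates"),
    ("SR3", "Rates"),
    ("AWM", "Grain"),
    ("AFB", "Grain"),
    ("KE", "Grain"),
    ("LWB", "Grain"),
    ("MWE", "Grain"),
    ("ZC", "Grain"),
    ("ZL", "Grain"),
    ("ZM", "Grain"),
    ("ZO", "Grain"),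
    ("ZR", "Grain"),
    ("ZS", "Grain"),
    ("ZW", "Grain"),
    ("CC", "Soft"),
    ("CT", "Soft"),
    ("DC", "Soft"),
    ("KC", "Soft"),
    ("LBR", "Soft"),
    ("LCC", "Soft"),
    ("LRC", "Soft"),
    ("LSU", "Soft"),
    ("OJ", "Soft"),
    ("RS", "Soft"),
    ("SB", "Soft"),
    ("GF", "Meat"),
    ("HE", "Meat"),
    ("LE", "Meat") ]

def symbol_to_sector_alt (symbol : String) : String :=
  match pvSectorBySymbol.get? symbol with
  | some sector => sector
  | none => ""   -- the ValueError path, excluded by Pre_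

-- ===== PRECONDITION & SPEC =====
-- Pre_ excludes exactly the symbols on which the Python A raises ValueError
def Pre_symbol_to_sector (symbol : String) : Prop :=
  symbol ∈ pvSectors.flatMap Prod.snd
instance (symbol : String) : Decidable (Pre_symbol_to_sector symbol) := by
  unfold Pre_symbol_to_sector; infer_instance

def pvWitness_symbol_to_sector : String := "VX"

def Spec_symbol_to_sector (symbol : String) (out : String) : Prop := out = symbol_to_sector_alt symbol
instance (symbol : String) (out : String) : Decidable (Spec_symbol_to_sector symbol out) := by unfold Spec_symbol_to_sector; infer_instance

-- ===== CLAIM =====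
def Claim_equal_symbol_to_sector : Prop := ∀ (symbol : String), Dom_symbol_to_sector symbol → Pre_symbol_to_sector symbol → Spec_symbol_to_sector symbol (symbol_to_sector symbol)

-- ===== LEMMAS AND PROOFS =====
theorem pv_all_agree :
    (pvSectors.flatMap Prod.snd).all
      (fun s => symbol_to_sector s == symbol_to_sector_alt s) = true := by
  set_option maxRecDepth 20000 in decide

-- ===== VERDICT =====
theorem symbol_to_sector_spec : Claim_equal_symbol_to_sector := by
  intro symbol _ hpre
  have h := List.all_eq_true.mp pv_all_agree symbol hpre
  exact (eq_of_beq h).symm ▸ rfl
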